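-- pv_equiv track=rewrite | github.com/changyanchuan/TrajSimiMeasures | utilities/tool_funcs.py | slicing
-- ===== SOURCE A (Python) =====
-- def slicing(list_len, num_slices):
--     if list_len <= num_slices:
--         return [(i, i+1) for i in range(list_len-1)]
--
--     slice_size = list_len // num_slices
--     extra = list_len % num_slices
--     rtn = []
--     for i in range(extra):
--         rtn.append( (i*(slice_size+1), (i+1)*(slice_size+1)) )
--
--     offset = extra*(slice_size+1)
--     for i in range(num_slices - extra):
--         rtn.append( (offset+i*slice_size, offset+(i+1)*slice_size) )
--     return rtn
-- ===== SOURCE B (Python) =====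
-- def slicing(list_len, num_slices):
--     if list_len <= num_slices:
--         return [(i, i + 1) for i in range(list_len - 1)]
--     q = list_len // num_slices
--     r = list_len % num_slices
--     sizes = [q + 1] * r + [q] * (num_slices - r)
--     bounds = [0]
--     total = 0
--     for s in sizes:
--         total += s
--         bounds.append(total)
--     return list(zip(bounds, bounds[1:]))
-- ===== Notes on version B (the rewrite author's own statement) =====
-- stated objective: alternative
-- what changed: B replaces A's two index-arithmetic loops by building a table of slice sizes, accumulating it into cumulative boundaries, and zipping consecutive boundaries into (start,end) pairs.
-- outside the precondition, e.g. on slicing(5, 0): A raises ZeroDivisionError, B raises ZeroDivisionError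
import Mathlib
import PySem

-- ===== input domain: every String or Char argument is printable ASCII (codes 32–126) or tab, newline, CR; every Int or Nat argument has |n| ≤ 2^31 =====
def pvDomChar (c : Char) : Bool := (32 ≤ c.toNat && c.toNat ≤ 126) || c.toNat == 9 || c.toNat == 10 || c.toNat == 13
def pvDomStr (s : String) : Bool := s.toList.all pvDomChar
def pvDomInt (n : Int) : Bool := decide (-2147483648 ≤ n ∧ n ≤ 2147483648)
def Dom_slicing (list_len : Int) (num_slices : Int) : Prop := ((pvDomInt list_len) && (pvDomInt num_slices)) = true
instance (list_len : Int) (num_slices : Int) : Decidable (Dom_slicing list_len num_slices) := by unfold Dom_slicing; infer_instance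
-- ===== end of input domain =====

-- B builds a sizes table and pairs consecutive cumulative boundaries (zip) instead of
-- two arithmetic index-computing loops; same cost, different decomposition.

-- ===== PORT A =====
def slicing (list_len : Int) (num_slices : Int) : List (Int × Int) :=
  if list_len ≤ num_slices then
    (PySem.List.pyRange 0 (list_len - 1) 1).map (fun i => (i, i + 1))
  else
    let slice_size := PySem.Int.floordiv list_len num_slices
    let extra := PySem.Int.mod list_len num_slices
    let rtn := (PySem.List.pyRange 0 extra 1).foldl
      (fun rtn i => rtn ++ [(i * (slice_size + 1), (i + 1) * (slice_size + 1))]) []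
    let offset := extra * (slice_size + 1)
    (PySem.List.pyRange 0 (num_slices - extra) 1).foldl
      (fun rtn i => rtn ++ [(offset + i * slice_size, offset + (i + 1) * slice_size)]) rtn

-- ===== PORT B =====
def slicing_alt (list_len : Int) (num_slices : Int) : List (Int × Int) :=
  if list_len ≤ num_slices then
    (PySem.List.pyRange 0 (list_len - 1) 1).map (fun i => (i, i + 1))
  else
    let q := PySem.Int.floordiv list_len num_slices
    let r := PySem.Int.mod list_len num_slices
    let sizes := List.replicate r.toNat (q + 1) ++ List.replicate (num_slices - r).toNat q
    -- bounds = [0]; total = 0; for s in sizes: total += s; bounds.append(total)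
    let st := sizes.foldl (fun (st : Int × List Int) s => (st.1 + s, st.2 ++ [st.1 + s])) (0, [0])
    st.2.zip st.2.tail

-- ===== PRECONDITION & SPEC =====
-- Pre_ excludes only num_slices = 0 with list_len > 0, where Python A raises ZeroDivisionError.
def Pre_slicing (list_len : Int) (num_slices : Int) : Prop :=
  list_len ≤ num_slices ∨ num_slices ≠ 0
instance (list_len : Int) (num_slices : Int) : Decidable (Pre_slicing list_len num_slices) := by
  unfold Pre_slicing; infer_instance
def pvWitness_slicing : Int × Int := (10, 3)

def Spec_slicing (list_len : Int) (num_slices : Int) (out : List (Int × Int)) : Prop := out = slicing_alt list_len num_slices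
instance (list_len : Int) (num_slices : Int) (out : List (Int × Int)) : Decidable (Spec_slicing list_len num_slices out) := by unfold Spec_slicing; infer_instance

-- ===== CLAIM (what is proved, stated in full; the proofs are below) =====
def Claim_equal_slicing : Prop := ∀ (list_len : Int) (num_slices : Int), Dom_slicing list_len num_slices → Pre_slicing list_len num_slices → Spec_slicing list_len num_slices (slicing list_len num_slices)

-- ===== LEMMAS AND PROOFS =====

/-- n contiguous slices of width s starting at t. -/
def mkSlices (t s : Int) : Nat → List (Int × Int)
  | 0 => []
  | n + 1 => (t, t + s) :: mkSlices (t + s) s n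

/-- partial sums of `sizes` continuing from total `t`. -/
def bl (t : Int) : List Int → List Int
  | [] => []
  | s :: rest => (t + s) :: bl (t + s) rest

/-- consecutive-boundary pairs of `sizes` starting at `t`. -/
def pairsOf (t : Int) : List Int → List (Int × Int)
  | [] => []
  | s :: rest => (t, t + s) :: pairsOf (t + s) rest

theorem map_range_mkSlices (s : Int) : ∀ (n : Nat) (off : Int),
    (List.range n).map (fun (k : Nat) => (off + (k : Int) * s, off + ((k : Int) + 1) * s))
      = mkSlices off s n := by
  intro n
  induction n with
  | zero => intro off; simp [mkSlices]
  | succ n ih =>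
    intro off
    rw [List.range_succ_eq_map, List.map_cons, List.map_map, mkSlices]
    congr 1
    · push_cast; simp only [Prod.mk.injEq]; constructor <;> ring
    · rw [← ih (off + s)]
      apply List.map_congr_left
      intro k _
      simp only [Function.comp_apply]
      push_cast
      simp only [Prod.mk.injEq]
      constructor <;> ring

theorem fold_bl : ∀ (sizes : List Int) (t : Int) (bs : List Int),
    sizes.foldl (fun (st : Int × List Int) s => (st.1 + s, st.2 ++ [st.1 + s])) (t, bs)
      = (t + sizes.sum, bs ++ bl t sizes) := by
  intro sizes
  induction sizes with
  | nil => intro t bs; simp [bl]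
  | cons s rest ih =>
    intro t bs
    simp only [List.foldl_cons, ih, bl, List.sum_cons, Prod.mk.injEq]
    constructor
    · ring
    · simp
theorem zip_bl : ∀ (sizes : List Int) (t : Int),
    (t :: bl t sizes).zip (bl t sizes) = pairsOf t sizes := by
  intro sizes
  induction sizes with
  | nil => intro t; simp [bl, pairsOf]
  | cons s rest ih => intro t; simp [bl, pairsOf, List.zip_cons_cons, ih]

theorem pairsOf_append : ∀ (l1 l2 : List Int) (t : Int),
    pairsOf t (l1 ++ l2) = pairsOf t l1 ++ pairsOf (t + l1.sum) l2 := by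
  intro l1
  induction l1 with
  | nil => intro l2 t; simp [pairsOf]
  | cons s rest ih =>
    intro l2 t
    simp only [List.cons_append, pairsOf, ih, List.sum_cons]
    rw [show t + s + rest.sum = t + (s + rest.sum) from by ring]
theorem pairsOf_replicate (s : Int) : ∀ (n : Nat) (t : Int),
    pairsOf t (List.replicate n s) = mkSlices t s n := by
  intro n
  induction n with
  | zero => intro t; simp [pairsOf, mkSlices]
  | succ n ih => intro t; simp only [List.replicate_succ, pairsOf, mkSlices, ih]

theorem foldl_app_map (f : Int → Int × Int) (l : List Int) (init : List (Int × Int)) :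
    l.foldl (fun acc i => acc ++ [f i]) init = init ++ l.map f := by
  induction l generalizing init with
  | nil => simp
  | cons x xs ih => simp [ih]

theorem pyRange_map_mkSlices (b s off : Int) :
    (PySem.List.pyRange 0 b 1).map (fun i => (off + i * s, off + (i + 1) * s))
      = mkSlices off s b.toNat := by
  rw [PySem.List.pyRange_one]
  rw [show (b - 0).toNat = b.toNat from by norm_num]
  simp only [List.map_map]
  rw [← map_range_mkSlices s b.toNat off]
  apply List.map_congr_left
  intro k _
  simp only [Function.comp_apply]
  norm_num

-- ===== VERDICT (by name: the statement is the Claim_ definition above) =====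
theorem slicing_spec : Claim_equal_slicing := by
  intro list_len num_slices _ hpre
  unfold Spec_slicing slicing slicing_alt
  by_cases hle : list_len ≤ num_slices
  · simp [hle]
  · simp only [if_neg hle]
    have hns : num_slices ≠ 0 := by
      rcases hpre with h | h
      · exact absurd h hle
      · exact h
    set q := PySem.Int.floordiv list_len num_slices with hq
    set r := PySem.Int.mod list_len num_slices with hr
    -- A side: two append-folds become two maps, then mkSlices
    rw [foldl_app_map, foldl_app_map, List.nil_append]
    have hA1 : (PySem.List.pyRange 0 r 1).map (fun i => (i * (q + 1), (i + 1) * (q + 1)))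
        = mkSlices 0 (q + 1) r.toNat := by
      have := pyRange_map_mkSlices r (q + 1) 0
      simpa using this
    have hA2 : (PySem.List.pyRange 0 (num_slices - r) 1).map
          (fun i => (r * (q + 1) + i * q, r * (q + 1) + (i + 1) * q))
        = mkSlices (r * (q + 1)) q (num_slices - r).toNat :=
      pyRange_map_mkSlices (num_slices - r) q (r * (q + 1))
    rw [hA1, hA2]
    -- B side
    rw [fold_bl]
    simp only [List.singleton_append, List.tail_cons]
    rw [zip_bl, pairsOf_append, pairsOf_replicate, pairsOf_replicate]
    have hsum : (List.replicate r.toNat (q + 1)).sum = (r.toNat : Int) * (q + 1) := by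
      simp [List.sum_replicate]
    rw [hsum, zero_add]
    -- the two decompositions agree piecewise
    by_cases hrpos : 0 ≤ r
    · rw [Int.toNat_of_nonneg hrpos]
    · -- r < 0 forces num_slices < 0 and num_slices - r < 0: both tails are empty
      push Not at hrpos
      have hb : num_slices < 0 := by
        by_contra hb
        push Not at hb
        have hb' : 0 < num_slices := lt_of_le_of_ne hb (Ne.symm hns)
        have := PySem.Int.mod_nonneg list_len hb'
        omega
      have hbd := (PySem.Int.mod_neg_bounds list_len hb).1
      have h1 : r.toNat = 0 := by omega
      have h2 : (num_slices - r).toNat = 0 := by omega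
      rw [h1, h2]
      simp [mkSlices]
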